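-- pv_equiv track=rewrite | github.com/WhiteEyeBlackCat/super-resolution_license_plate_recognition | model/training_components/plate_metrics.py | plate_score
-- ===== SOURCE A (Python) =====
-- def plate_score(pred, gt):
--     if pred is None or len(pred) != len(gt):
--         return None
--     score = 0
--     for p, g in zip(pred, gt):
--         if p == g:
--             score += 2
--         elif p == "?":
--             continue
--         else:
--             score -= 1
--     return score
-- ===== SOURCE B (Python) =====
-- def plate_score(pred, gt):
--     if pred is None or len(pred) != len(gt):
--         return None
--     pairs = list(zip(pred, gt))
--     m = sum(1 for p, g in pairs if p == g)
--     q = sum(1 for p, g in pairs if p == "?" and p != g)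
--     return 3 * m + q - len(gt)
-- ===== Notes on version B (the rewrite author's own statement) =====
-- stated objective: alternative
-- what changed: Replaces the per-character +2/0/-1 branching accumulator with two counting passes (matches m, non-matching wildcards q) and the closed form 3*m + q - len(gt).
import Mathlib
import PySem

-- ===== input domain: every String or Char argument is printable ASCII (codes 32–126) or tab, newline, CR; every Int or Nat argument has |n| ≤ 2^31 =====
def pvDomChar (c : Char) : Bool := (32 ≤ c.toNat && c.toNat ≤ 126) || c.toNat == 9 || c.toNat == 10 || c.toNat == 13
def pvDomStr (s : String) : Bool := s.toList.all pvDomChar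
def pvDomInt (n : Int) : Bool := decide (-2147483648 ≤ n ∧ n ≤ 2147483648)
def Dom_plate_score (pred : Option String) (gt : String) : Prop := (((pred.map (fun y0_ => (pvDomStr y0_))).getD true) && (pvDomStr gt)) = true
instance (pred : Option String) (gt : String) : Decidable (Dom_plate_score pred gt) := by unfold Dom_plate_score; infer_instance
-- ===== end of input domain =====

-- B replaces A's per-character branching accumulator with two counts and a closed form (alternative decomposition, same cost).
-- ===== PORT A =====
def plate_score (pred : Option String) (gt : String) : Option Int :=
  match pred with
  | none => none
  | some p =>
    if p.toList.length ≠ gt.toList.length then none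
    else
      some ((List.zip p.toList gt.toList).foldl
        (fun score pg =>
          if pg.1 == pg.2 then score + 2
          else if pg.1 == '?' then score
          else score - 1) 0)

-- ===== PORT B =====
def plate_score_alt (pred : Option String) (gt : String) : Option Int :=
  match pred with
  | none => none
  | some p =>
    if p.toList.length ≠ gt.toList.length then none
    else
      let pairs := List.zip p.toList gt.toList
      let m := pairs.countP (fun pg => pg.1 == pg.2)
      let q := pairs.countP (fun pg => pg.1 == '?' && pg.1 != pg.2)
      some (3 * (m : Int) + (q : Int) - (gt.toList.length : Int))

-- ===== PRECONDITION & SPEC =====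
def Spec_plate_score (pred : Option String) (gt : String) (out : Option Int) : Prop := out = plate_score_alt pred gt
instance (pred : Option String) (gt : String) (out : Option Int) : Decidable (Spec_plate_score pred gt out) := by unfold Spec_plate_score; infer_instance

-- ===== CLAIM (what is proved, stated in full; the proofs are below) =====
def Claim_equal_plate_score : Prop := ∀ (pred : Option String) (gt : String), Dom_plate_score pred gt → Spec_plate_score pred gt (plate_score pred gt)

-- ===== LEMMAS AND PROOFS =====

lemma plate_score_fold_count (l : List (Char × Char)) (s : Int) :
    l.foldl (fun score pg =>
        if pg.1 == pg.2 then score + 2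
        else if pg.1 == '?' then score
        else score - 1) s
      = s + 3 * (l.countP (fun pg => pg.1 == pg.2) : Int)
          + (l.countP (fun pg => pg.1 == '?' && pg.1 != pg.2) : Int)
          - (l.length : Int) := by
  induction l generalizing s with
  | nil => simp
  | cons hd tl ih =>
    simp only [List.foldl_cons, List.countP_cons, List.length_cons, ih]
    by_cases h1 : hd.1 = hd.2
    · have hb : (hd.1 == hd.2) = true := by simp [h1]
      have h2 : (hd.1 != hd.2) = false := by simp [bne, h1]
      simp only [hb, h2, Bool.and_false, Bool.false_eq_true, ite_false, ite_true]
      push_cast; ring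
    · have hb : (hd.1 == hd.2) = false := by simp [h1]
      by_cases h3 : hd.1 = '?'
      · have h4 : (hd.1 == '?') = true := by simp [h3]
        have h5 : (hd.1 != hd.2) = true := by simp [bne, h1]
        simp only [hb, h4, h5, Bool.true_and, Bool.false_eq_true, ite_false, ite_true]
        push_cast; ring
      · have h4 : (hd.1 == '?') = false := by simp [h3]
        simp only [hb, h4, Bool.false_and, Bool.false_eq_true, ite_false]
        push_cast; ring

-- ===== VERDICT (by name: the statement is the Claim_ definition above) =====
theorem plate_score_spec : Claim_equal_plate_score := by
  intro pred gt _
  unfold Spec_plate_score plate_score plate_score_alt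
  cases pred with
  | none => rfl
  | some p =>
    simp only
    by_cases h : p.toList.length = gt.toList.length
    · rw [if_neg (by omega), if_neg (by omega)]
      rw [plate_score_fold_count]
      have hz : (List.zip p.toList gt.toList).length = gt.toList.length := by
        simp [List.length_zip, h]
      rw [hz]; congr 1; push_cast; ring
    · rw [if_pos (by omega), if_pos (by omega)]
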